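-- pv_equiv track=rewrite | github.com/RioBlumenthal/Strands-Solver | test_solver.py | convertBinaryToWord
-- ===== SOURCE A (Python) =====
-- ROWS = 8
--
-- COLS = 6
--
-- def convertBinaryToWord(binary_number):
--     word = ""
--     for i in range(ROWS - 1, -1, -1):
--         for j in range(COLS):
--             if binary_number & 1:
--                 word += board[i][j]
--             binary_number >>= 1  # Shift right after processing each bit
--     return word
--
-- board = [['a', 't', 'r', 'i', 'o', 'd'], ['r', 'e', 'm', 'p', 'e', 'r'], ['p', 'o', 'a', 'c', 't', 'y'], ['t', 'h', 't', 'l', 'h', 'l'], ['i', 'm', 'o', 'i', 'p', 'e'], ['e', 'g', 'f', 'a', 'n', 's'], ['r', 'i', 'r', 'h', 'a', 'l'], ['l', 'g', 'h', 't', 's', 'f']]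
-- ===== SOURCE B (Python) =====
-- ROWS = 8
--
-- COLS = 6
--
-- board = [['a', 't', 'r', 'i', 'o', 'd'], ['r', 'e', 'm', 'p', 'e', 'r'], ['p', 'o', 'a', 'c', 't', 'y'], ['t', 'h', 't', 'l', 'h', 'l'], ['i', 'm', 'o', 'i', 'p', 'e'], ['e', 'g', 'f', 'a', 'n', 's'], ['r', 'i', 'r', 'h', 'a', 'l'], ['l', 'g', 'h', 't', 's', 'f']]
--
-- # Precomputed lookup table: for every row and every 6-bit value v, the word the
-- # row contributes when its selection bits are v.
-- ROW_WORDS = [["".join(ch for k, ch in enumerate(row) if (v >> k) & 1)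
--               for v in range(64)]
--              for row in board]
--
-- def convertBinaryToWord(binary_number):
--     # Base-64 digit decomposition: each divmod peels one row's 6 selection bits,
--     # answered by a single table lookup instead of a per-bit scan.
--     pieces = []
--     for i in range(ROWS - 1, -1, -1):
--         binary_number, r = divmod(binary_number, 64)
--         pieces.append(ROW_WORDS[i][r])
--     return "".join(pieces)
-- ===== Notes on version B (the rewrite author's own statement) =====
-- stated objective: alternative
-- what changed: Replaces A's per-bit scan over every board cell (shift-by-one mutation, one letter appended per set bit) by a precomputed per-row lookup table of sixty-four words and a base-sixty-four digit decomposition via divmod, one table lookup per row.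
import Mathlib
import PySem

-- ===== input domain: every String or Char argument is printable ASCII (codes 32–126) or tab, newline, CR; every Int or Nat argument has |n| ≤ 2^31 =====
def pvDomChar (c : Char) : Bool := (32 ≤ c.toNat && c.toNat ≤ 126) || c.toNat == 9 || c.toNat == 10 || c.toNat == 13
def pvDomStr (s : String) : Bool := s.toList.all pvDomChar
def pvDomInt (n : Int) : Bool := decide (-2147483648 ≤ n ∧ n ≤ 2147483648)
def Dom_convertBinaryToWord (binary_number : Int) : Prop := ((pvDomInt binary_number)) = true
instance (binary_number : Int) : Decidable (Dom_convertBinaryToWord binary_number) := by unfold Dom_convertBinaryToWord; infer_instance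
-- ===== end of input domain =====

set_option maxRecDepth 100000

-- B replaces A's per-bit scan over every board cell by a precomputed per-row word table
-- consulted by a base-sixty-four divmod digit decomposition, one lookup per row (objective: alternative).

def pvBoard : List (List String) :=
  [["a","t","r","i","o","d"], ["r","e","m","p","e","r"], ["p","o","a","c","t","y"],
   ["t","h","t","l","h","l"], ["i","m","o","i","p","e"], ["e","g","f","a","n","s"],
   ["r","i","r","h","a","l"], ["l","g","h","t","s","f"]]

-- ===== PORT A =====
-- board[i][j]: i ∈ range(7,-1,-1), j ∈ range(6) are always in range, so pyGet?+getD is exact here.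
-- core right shift at a Nat amount (exact for Python's >> with a nonnegative shift)
def pvShr (n : Int) (k : Nat) : Int := n >>> k

def convertBinaryToWord (binary_number : Int) : String :=
  ((PySem.List.pyRange 7 (-1) (-1)).foldl (fun st i =>
    (PySem.List.pyRange 0 6 1).foldl (fun st j =>
      let word := if PySem.Int.band st.2 1 != 0
        then st.1 ++ ((PySem.List.pyGet? ((PySem.List.pyGet? pvBoard i).getD []) j).getD "")
        else st.1
      (word, pvShr st.2 1)) st) ("", binary_number)).1

-- ===== PORT B =====
-- ROW_WORDS: for every row and 6-bit value v, the word that row contributes when its bits are v.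
-- k from enumerate is ≥ 0, so Python's 'v >> k' is core '>>> k.toNat' exactly.
def pvRowWords : List (List String) :=
  pvBoard.map (fun row =>
    (PySem.List.pyRange 0 64 1).map (fun v =>
      PySem.Str.join "" (((PySem.List.enumerate row 0).filter
        (fun p => PySem.Int.band (v >>> p.1.toNat) 1 != 0)).map (·.2))))

-- B's loop body: divmod peels one base-64 digit; divisor 64 ≠ 0, so divmod? never raises.
def pvStepB (st : Int × List String) (i : Int) : Int × List String :=
  let qr := (PySem.Int.divmod? st.1 64).getD (0, 0)
  (qr.1, st.2 ++ [PySem.List.pyGetD (PySem.List.pyGetD pvRowWords i []) qr.2 ""])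

def convertBinaryToWord_alt (binary_number : Int) : String :=
  PySem.Str.join ""
    (((PySem.List.pyRange 7 (-1) (-1)).foldl pvStepB (binary_number, [])).2)

-- ===== PRECONDITION & SPEC =====
def Spec_convertBinaryToWord (binary_number : Int) (out : String) : Prop := out = convertBinaryToWord_alt binary_number
instance (binary_number : Int) (out : String) : Decidable (Spec_convertBinaryToWord binary_number out) := by unfold Spec_convertBinaryToWord; infer_instance

-- ===== CLAIM (what is proved, stated in full; the proofs are below) =====
def Claim_equal_convertBinaryToWord : Prop := ∀ (binary_number : Int), Dom_convertBinaryToWord binary_number → Spec_convertBinaryToWord binary_number (convertBinaryToWord binary_number)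

-- ===== LEMMAS AND PROOFS =====

-- common normal form: the word selected from a letter list by the low bits of n,
-- bits consumed arithmetically (n % 2, n / 2)
def pvPick : List String → Int → String
  | [], _ => ""
  | c :: cs, n => if n % 2 = 1 then c ++ pvPick cs (n / 2) else pvPick cs (n / 2)

-- the 8 board rows, in bit order (row 7 first)
def pvR7 : List String := ["l","g","h","t","s","f"]
def pvR6 : List String := ["r","i","r","h","a","l"]
def pvR5 : List String := ["e","g","f","a","n","s"]
def pvR4 : List String := ["i","m","o","i","p","e"]
def pvR3 : List String := ["t","h","t","l","h","l"]
def pvR2 : List String := ["p","o","a","c","t","y"]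
def pvR1 : List String := ["r","e","m","p","e","r"]
def pvR0 : List String := ["a","t","r","i","o","d"]

-- the 48 board letters in bit order
def pvFlat : List String := pvR7 ++ (pvR6 ++ (pvR5 ++ (pvR4 ++ (pvR3 ++ (pvR2 ++ (pvR1 ++ pvR0))))))

-- A's loop body on one flat letter
def pvStep (st : String × Int) (c : String) : String × Int :=
  (if PySem.Int.band st.2 1 != 0 then st.1 ++ c else st.1, pvShr st.2 1)

theorem pvStepEq (w : String) (m : Int) (c : String) :
    pvStep (w, m) c = ((if m % 2 = 1 then w ++ c else w), m / 2) := by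
  have hb : PySem.Int.band m 1 = m % 2 := by
    rw [PySem.Int.band_one, PySem.Int.mod_eq_emod_of_pos (by norm_num)]
  have hs : pvShr m 1 = m / 2 := by simp [pvShr, Int.shiftRight_eq_div_pow]
  have h2 := Int.emod_two_eq m
  rcases h2 with h | h <;> simp [pvStep, hb, hs, h]

theorem pvFoldA (cs : List String) (w : String) (m : Int) :
    (cs.foldl pvStep (w, m)).1 = w ++ pvPick cs m := by
  induction cs generalizing w m with
  | nil => simp [pvPick]
  | cons c cs ih =>
    show (cs.foldl pvStep (pvStep (w, m) c)).1 = w ++ pvPick (c :: cs) m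
    rw [pvStepEq, pvPick]
    split <;> rw [ih] <;> simp [String.append_assoc]

theorem pvA_eq_pick (n : Int) : convertBinaryToWord n = pvPick pvFlat n := by
  have h0 : convertBinaryToWord n = (pvFlat.foldl pvStep ("", n)).1 := rfl
  rw [h0, pvFoldA]
  simp

-- ---- arithmetic: halving a remainder ----
theorem pvHalfMod (n k : Int) (hk : 0 < k) : (n % (2 * k)) / 2 = (n / 2) % k := by
  have h := Int.mul_ediv_add_emod n (2 * k)
  have hr0 : 0 ≤ n % (2 * k) := Int.emod_nonneg n (by omega)
  have hr1 : n % (2 * k) < 2 * k := Int.emod_lt_of_pos n (by omega)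
  generalize hq : n / (2 * k) = q at h
  generalize hr : n % (2 * k) = r at h hr0 hr1 ⊢
  have hdiv : n / 2 = r / 2 + k * q := by
    have hn : n = r + 2 * (k * q) := by linarith
    rw [hn, Int.add_mul_ediv_left _ _ (by norm_num : (2:Int) ≠ 0)]
  rw [hdiv, Int.add_mul_emod_self_left]
  exact (Int.emod_eq_of_lt (by omega) (by omega)).symm

theorem pvPick_mod (xs : List String) (n m : Int) (hm : 0 < m)
    (hdvd : (2:Int) ^ xs.length ∣ m) : pvPick xs (n % m) = pvPick xs n := by
  induction xs generalizing n m with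
  | nil => rfl
  | cons c cs ih =>
    have h2 : (2:Int) ∣ m := dvd_trans (dvd_pow_self 2 (by simp)) hdvd
    obtain ⟨k, hk⟩ := h2
    have hk0 : 0 < k := by omega
    have hdvd' : (2:Int) ^ cs.length ∣ k := by
      obtain ⟨c', hc⟩ := hdvd
      refine ⟨c', ?_⟩
      have h1 : (2:Int) * k = 2 * (2 ^ cs.length * c') := by
        rw [← hk, hc, List.length_cons, pow_succ]; ring
      exact mul_left_cancel₀ (by norm_num) h1
    have hhead : (n % m) % 2 = n % 2 := Int.emod_emod_of_dvd n ⟨k, hk⟩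
    have htail : pvPick cs ((n % m) / 2) = pvPick cs (n / 2) := by
      rw [hk, pvHalfMod n k hk0]
      exact ih (n / 2) k hk0 hdvd'
    rw [pvPick, pvPick, hhead, htail]

-- splitting the letter list splits the bits
theorem pvPick_append (xs ys : List String) (n : Int) :
    pvPick (xs ++ ys) n = pvPick xs n ++ pvPick ys (n / 2 ^ xs.length) := by
  induction xs generalizing n with
  | nil => simp [pvPick]
  | cons c cs ih =>
    show pvPick (c :: (cs ++ ys)) n = pvPick (c :: cs) n ++ pvPick ys (n / 2 ^ (c :: cs).length)
    rw [pvPick, pvPick]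
    have hdd : n / 2 / 2 ^ cs.length = n / 2 ^ (c :: cs).length := by
      rw [Int.ediv_ediv_of_nonneg (by norm_num)]
      congr 1
      simp [List.length_cons, pow_succ]; ring
    split <;> rw [ih, hdd] <;> simp [String.append_assoc]

theorem pvSplit64 (xs ys : List String) (n : Int) (h : xs.length = 6) :
    pvPick (xs ++ ys) n = pvPick xs n ++ pvPick ys (n / 64) := by
  have := pvPick_append xs ys n
  rw [h] at this
  norm_num at this
  exact this

-- join with the empty separator is foldr append
theorem pvJoinEmpty (l : List String) : PySem.Str.join "" l = l.foldr (· ++ ·) "" := by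
  induction l with
  | nil => rfl
  | cons s t ih =>
    cases t with
    | nil => simp [PySem.Str.join, PySem.Chars.join_singleton]
    | cons u r =>
      show PySem.Str.join "" (s :: u :: r) = s ++ (u :: r).foldr (· ++ ·) ""
      rw [← ih]
      show String.ofList (PySem.Chars.join [] (List.map String.toList (s :: u :: r)))
          = s ++ PySem.Str.join "" (u :: r)
      simp only [List.map_cons]
      rw [PySem.Chars.join_cons_cons]
      simp [PySem.Str.join, String.ofList_append]

-- one B step, against a row whose table is the pick table
theorem pvStepB_eq (w : List String) (m : Int) (i : Int) (row : List String)
    (hrow : PySem.List.pyGetD pvRowWords i [] =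
      (PySem.List.pyRange 0 64 1).map (fun v => pvPick row v))
    (hlen : row.length = 6) :
    pvStepB (m, w) i = (m / 64, w ++ [pvPick row m]) := by
  have hdm : (PySem.Int.divmod? m 64).getD (0, 0) = (m / 64, m % 64) := by
    simp [PySem.Int.divmod?, Int.fdiv_eq_ediv, Int.fmod_eq_emod]
  have hr0 : (0:Int) ≤ m % 64 := Int.emod_nonneg m (by norm_num)
  have hr1 : m % 64 < 64 := Int.emod_lt_of_pos m (by norm_num)
  have hcast : m % 64 = (((m % 64).toNat : Nat) : Int) := by omega
  have hlook : PySem.List.pyGetD ((PySem.List.pyRange 0 64 1).map (fun v => pvPick row v))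
      (m % 64) "" = pvPick row (m % 64) := by
    rw [hcast]
    have h64 : ((64:Nat) : Int) = (64 : Int) := by norm_num
    rw [show ((PySem.List.pyRange 0 64 1).map (fun v => pvPick row v))
          = ((PySem.List.pyRange 0 ((64:Nat):Int) 1).map (fun v => pvPick row v)) by rw [h64]]
    exact PySem.List.pyGetD_map_pyRange (fun v => pvPick row v) 64 (m % 64).toNat "" (by omega)
  have hmod : pvPick row (m % 64) = pvPick row m :=
    pvPick_mod row m 64 (by norm_num) (by rw [hlen]; norm_num)
  show ((((PySem.Int.divmod? m 64).getD (0, 0)).1),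
      w ++ [PySem.List.pyGetD (PySem.List.pyGetD pvRowWords i []) ((PySem.Int.divmod? m 64).getD (0, 0)).2 ""]) = _
  rw [hdm, hrow]
  simp only [hlook, hmod]

-- the per-row table facts, evaluated
theorem pvRowTab7 : PySem.List.pyGetD pvRowWords 7 [] = (PySem.List.pyRange 0 64 1).map (fun v => pvPick pvR7 v) := by decide
theorem pvRowTab6 : PySem.List.pyGetD pvRowWords 6 [] = (PySem.List.pyRange 0 64 1).map (fun v => pvPick pvR6 v) := by decide
theorem pvRowTab5 : PySem.List.pyGetD pvRowWords 5 [] = (PySem.List.pyRange 0 64 1).map (fun v => pvPick pvR5 v) := by decide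
theorem pvRowTab4 : PySem.List.pyGetD pvRowWords 4 [] = (PySem.List.pyRange 0 64 1).map (fun v => pvPick pvR4 v) := by decide
theorem pvRowTab3 : PySem.List.pyGetD pvRowWords 3 [] = (PySem.List.pyRange 0 64 1).map (fun v => pvPick pvR3 v) := by decide
theorem pvRowTab2 : PySem.List.pyGetD pvRowWords 2 [] = (PySem.List.pyRange 0 64 1).map (fun v => pvPick pvR2 v) := by decide
theorem pvRowTab1 : PySem.List.pyGetD pvRowWords 1 [] = (PySem.List.pyRange 0 64 1).map (fun v => pvPick pvR1 v) := by decide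
theorem pvRowTab0 : PySem.List.pyGetD pvRowWords 0 [] = (PySem.List.pyRange 0 64 1).map (fun v => pvPick pvR0 v) := by decide

theorem pvB_eq_pick (n : Int) : convertBinaryToWord_alt n = pvPick pvFlat n := by
  have hrange : PySem.List.pyRange 7 (-1) (-1) = [7, 6, 5, 4, 3, 2, 1, 0] := by decide
  show PySem.Str.join "" (((PySem.List.pyRange 7 (-1) (-1)).foldl pvStepB (n, [])).2) = _
  rw [hrange]
  simp only [List.foldl_cons, List.foldl_nil]
  rw [pvStepB_eq [] n 7 pvR7 pvRowTab7 rfl,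
      pvStepB_eq _ _ 6 pvR6 pvRowTab6 rfl,
      pvStepB_eq _ _ 5 pvR5 pvRowTab5 rfl,
      pvStepB_eq _ _ 4 pvR4 pvRowTab4 rfl,
      pvStepB_eq _ _ 3 pvR3 pvRowTab3 rfl,
      pvStepB_eq _ _ 2 pvR2 pvRowTab2 rfl,
      pvStepB_eq _ _ 1 pvR1 pvRowTab1 rfl,
      pvStepB_eq _ _ 0 pvR0 pvRowTab0 rfl]
  rw [pvJoinEmpty]
  rw [show pvFlat = pvR7 ++ (pvR6 ++ (pvR5 ++ (pvR4 ++ (pvR3 ++ (pvR2 ++ (pvR1 ++ pvR0)))))) from rfl]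
  rw [pvSplit64 _ _ _ rfl, pvSplit64 _ _ _ rfl, pvSplit64 _ _ _ rfl, pvSplit64 _ _ _ rfl,
      pvSplit64 _ _ _ rfl, pvSplit64 _ _ _ rfl, pvSplit64 _ _ _ rfl]
  simp

-- ===== VERDICT (by name: the statement is the Claim_ definition above) =====
theorem convertBinaryToWord_spec : Claim_equal_convertBinaryToWord := by
  intro n _
  show convertBinaryToWord n = convertBinaryToWord_alt n
  rw [pvA_eq_pick, pvB_eq_pick]
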